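-- pv_equiv track=rewrite | github.com/AndrewMichael2020/lit-nonfiction-weave | src/storygraph/context_loader.py | extract_notes_fragments
-- ===== SOURCE A (Python) =====
-- def extract_notes_fragments(notes: str, max_chars: int = 800) -> str:
--     """
--     Extract key fragments from notes.md for prompt conditioning.
--
--     Prioritizes:
--     - Fragments section (concrete sensory details)
--     - Voice reminders (tone/style guidance)
--
--     Returns compact string suitable for prompt injection.
--     """
--     if not notes:
--         return ""
--
--     # Look for ## Fragments section
--     fragments = []
--     voice_reminders = []
--
--     lines = notes.splitlines()
--     current_section = None
--
--     for line in lines: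
--         if line.startswith("## Fragments"):
--             current_section = "fragments"
--             continue
--         elif line.startswith("## Voice Reminders"):
--             current_section = "voice"
--             continue
--         elif line.startswith("##"):
--             current_section = None
--             continue
--
--         if current_section == "fragments" and line.strip().startswith("-"):
--             fragments.append(line.strip())
--         elif current_section == "voice" and line.strip().startswith("-"):
--             voice_reminders.append(line.strip())
--
--     result = []
--     if fragments:
--         result.append("AUTHOR FRAGMENTS:")
--         result.extend(fragments[:10])  # Limit to 10 fragments
--     if voice_reminders:
--         result.append("\nVOICE GUIDANCE:")
--         result.extend(voice_reminders[:5])  # Limit to 5 reminders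
--
--     output = "\n".join(result)
--     if len(output) > max_chars:
--         output = output[:max_chars] + "..."
--
--     return output
-- ===== SOURCE B (Python) =====
-- def extract_notes_fragments(notes: str, max_chars: int = 800) -> str:
--     """Two independent single-purpose scans instead of one three-state machine."""
--     if not notes:
--         return ""
--     lines = notes.splitlines()
--
--     def collect(header):
--         out, inside = [], False
--         for line in lines:
--             if line.startswith("##"):
--                 inside = line.startswith(header)
--             elif inside and line.strip().startswith("-"):
--                 out.append(line.strip())
--         return out
--
--     fragments = collect("## Fragments")
--     voice_reminders = collect("## Voice Reminders")
--
--     result = []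
--     if fragments:
--         result.append("AUTHOR FRAGMENTS:")
--         result += fragments[:10]
--     if voice_reminders:
--         result.append("\nVOICE GUIDANCE:")
--         result += voice_reminders[:5]
--
--     output = "\n".join(result)
--     if len(output) > max_chars:
--         output = output[:max_chars] + "..."
--     return output
-- ===== Notes on version B (the rewrite author's own statement) =====
-- stated objective: simpler
-- what changed: Replaces A's single pass with a three-valued current-section state machine and an if/elif accumulation chain by one reusable boolean-state scan, run once per header, so each section is collected by an independent single-purpose pass.
import Mathlib
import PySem

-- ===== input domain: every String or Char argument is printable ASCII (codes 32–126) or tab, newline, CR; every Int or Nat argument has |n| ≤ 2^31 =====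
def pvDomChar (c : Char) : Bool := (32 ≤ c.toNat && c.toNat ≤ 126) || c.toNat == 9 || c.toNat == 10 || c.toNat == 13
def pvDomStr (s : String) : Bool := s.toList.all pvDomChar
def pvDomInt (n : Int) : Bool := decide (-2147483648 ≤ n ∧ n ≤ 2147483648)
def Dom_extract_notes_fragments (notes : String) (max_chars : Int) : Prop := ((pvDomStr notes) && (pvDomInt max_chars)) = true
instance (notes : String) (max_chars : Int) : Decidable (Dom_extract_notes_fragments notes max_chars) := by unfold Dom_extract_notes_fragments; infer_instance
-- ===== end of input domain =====

-- B replaces A's three-valued state machine by one reusable boolean-state scan run once per header (objective: simpler).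

-- ===== PORT A =====
-- one loop, state = (fragments, voice_reminders, current_section : Option String)
def pvStepA (st : List String × List String × Option String) (line : String) :
    List String × List String × Option String :=
  if PySem.Str.startswith line "## Fragments" then (st.1, st.2.1, some "fragments")
  else if PySem.Str.startswith line "## Voice Reminders" then (st.1, st.2.1, some "voice")
  else if PySem.Str.startswith line "##" then (st.1, st.2.1, none)
  else if st.2.2 == some "fragments" && PySem.Str.startswith (PySem.Str.strip line) "-" then
    (st.1 ++ [PySem.Str.strip line], st.2.1, st.2.2)
  else if st.2.2 == some "voice" && PySem.Str.startswith (PySem.Str.strip line) "-" then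
    (st.1, st.2.1 ++ [PySem.Str.strip line], st.2.2)
  else st

def extract_notes_fragments (notes : String) (max_chars : Int) : String :=
  if notes == "" then ""
  else
    let lines := PySem.Str.splitlines notes
    let st := lines.foldl pvStepA ([], [], none)
    let fragments := st.1
    let voice_reminders := st.2.1
    let result :=
      (if fragments ≠ [] then ["AUTHOR FRAGMENTS:"] ++ PySem.List.slice fragments none (some 10) else [])
      ++ (if voice_reminders ≠ [] then ["\nVOICE GUIDANCE:"] ++ PySem.List.slice voice_reminders none (some 5) else [])
    let output := PySem.Str.join "\n" result
    if PySem.Str.len output > max_chars then PySem.Str.slice output none (some max_chars) ++ "..." else output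

-- ===== PORT B =====
-- boolean-state scan collecting the bullet lines of the sections whose header starts with `header`
def pvCollect (lines : List String) (header : String) : List String :=
  (lines.foldl (fun (st : List String × Bool) line =>
      if PySem.Str.startswith line "##" then (st.1, PySem.Str.startswith line header)
      else if st.2 && PySem.Str.startswith (PySem.Str.strip line) "-" then
        (st.1 ++ [PySem.Str.strip line], st.2)
      else st)
    ([], false)).1

def extract_notes_fragments_alt (notes : String) (max_chars : Int) : String :=
  if notes == "" then ""
  else
    let lines := PySem.Str.splitlines notes
    let fragments := pvCollect lines "## Fragments"
    let voice_reminders := pvCollect lines "## Voice Reminders"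
    let result :=
      (if fragments ≠ [] then ["AUTHOR FRAGMENTS:"] ++ PySem.List.slice fragments none (some 10) else [])
      ++ (if voice_reminders ≠ [] then ["\nVOICE GUIDANCE:"] ++ PySem.List.slice voice_reminders none (some 5) else [])
    let output := PySem.Str.join "\n" result
    if PySem.Str.len output > max_chars then PySem.Str.slice output none (some max_chars) ++ "..." else output

-- ===== PRECONDITION & SPEC =====
def Spec_extract_notes_fragments (notes : String) (max_chars : Int) (out : String) : Prop := out = extract_notes_fragments_alt notes max_chars
instance (notes : String) (max_chars : Int) (out : String) : Decidable (Spec_extract_notes_fragments notes max_chars out) := by unfold Spec_extract_notes_fragments; infer_instance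

-- ===== CLAIM (what is proved, stated in full; the proofs are below) =====
def Claim_equal_extract_notes_fragments : Prop := ∀ (notes : String) (max_chars : Int), Dom_extract_notes_fragments notes max_chars → Spec_extract_notes_fragments notes max_chars (extract_notes_fragments notes max_chars)

-- ===== LEMMAS AND PROOFS =====

theorem pv_sw_trans {line p q : String} (hpq : p.toList <+: q.toList)
    (h : PySem.Str.startswith line q = true) : PySem.Str.startswith line p = true := by
  rw [PySem.Str.startswith_eq] at h ⊢
  rw [PySem.Chars.startswith_iff] at h ⊢
  exact hpq.trans h

theorem pv_frag_not_voice {line : String}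
    (h : PySem.Str.startswith line "## Fragments" = true) :
    PySem.Str.startswith line "## Voice Reminders" = false := by
  by_contra hv
  rw [Bool.not_eq_false] at hv
  rw [PySem.Str.startswith_eq, PySem.Chars.startswith_iff] at h hv
  have := List.prefix_of_prefix_length_le h hv (by decide)
  revert this; decide

-- the core invariant: A's single fold equals the two boolean-state folds
theorem pv_fold_eq (lines : List String) (frs vos : List String) (cur : Option String) :
    lines.foldl pvStepA (frs, vos, cur) =
      ((lines.foldl (fun (st : List String × Bool) line =>
          if PySem.Str.startswith line "##" then (st.1, PySem.Str.startswith line "## Fragments")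
          else if st.2 && PySem.Str.startswith (PySem.Str.strip line) "-" then
            (st.1 ++ [PySem.Str.strip line], st.2)
          else st) (frs, cur == some "fragments")).1,
       (lines.foldl (fun (st : List String × Bool) line =>
          if PySem.Str.startswith line "##" then (st.1, PySem.Str.startswith line "## Voice Reminders")
          else if st.2 && PySem.Str.startswith (PySem.Str.strip line) "-" then
            (st.1 ++ [PySem.Str.strip line], st.2)
          else st) (vos, cur == some "voice")).1,
       (lines.foldl pvStepA (frs, vos, cur)).2.2) := by
  induction lines generalizing frs vos cur with
  | nil => rfl
  | cons line rest ih =>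
    simp only [List.foldl_cons]
    by_cases hF : PySem.Str.startswith line "## Fragments" = true
    · have h2 : PySem.Str.startswith line "##" = true := pv_sw_trans (by decide) hF
      have hV := pv_frag_not_voice hF
      simp only [pvStepA, hF, h2, hV, if_true, if_false, Bool.false_eq_true]
      simpa using ih frs vos (some "fragments")
    · by_cases hV : PySem.Str.startswith line "## Voice Reminders" = true
      · have h2 : PySem.Str.startswith line "##" = true := pv_sw_trans (by decide) hV
        simp only [pvStepA, hF, hV, h2, if_true, if_false, Bool.false_eq_true]
        simpa using ih frs vos (some "voice")
      · by_cases h2 : PySem.Str.startswith line "##" = true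
        · simp only [pvStepA, hF, hV, h2, if_true, if_false, Bool.false_eq_true]
          simpa [hF, hV] using ih frs vos none
        · by_cases hb : PySem.Str.startswith (PySem.Str.strip line) "-" = true
          · match cur with
            | some "fragments" =>
              simp only [pvStepA, hF, hV, h2, hb, Bool.false_eq_true, if_false]
              simpa using ih (frs ++ [PySem.Str.strip line]) vos (some "fragments")
            | some "voice" =>
              simp only [pvStepA, hF, hV, h2, hb, Bool.false_eq_true, if_false]
              simpa using ih frs (vos ++ [PySem.Str.strip line]) (some "voice")
            | none =>
              simp only [pvStepA, hF, hV, h2, hb, Bool.false_eq_true, if_false]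
              simpa using ih frs vos none
            | some s =>
              simp only [pvStepA, hF, hV, h2, hb, Bool.false_eq_true, if_false]
              by_cases hsf : s = "fragments"
              · subst hsf; simpa using ih (frs ++ [PySem.Str.strip line]) vos (some "fragments")
              · by_cases hsv : s = "voice"
                · subst hsv; simpa using ih frs (vos ++ [PySem.Str.strip line]) (some "voice")
                · have e1 : ((some s : Option String) == some "fragments") = false := by
                    simp [hsf]
                  have e2 : ((some s : Option String) == some "voice") = false := by
                    simp [hsv]
                  simp only [e1, e2, Bool.false_and, Bool.false_eq_true, if_false]
                  simpa [e1, e2] using ih frs vos (some s)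
          · have hb' : PySem.Str.startswith (PySem.Str.strip line) "-" = false := by
              simpa using hb
            simp only [pvStepA, hF, hV, h2, hb', Bool.and_false, Bool.false_eq_true, if_false]
            exact ih frs vos cur

-- ===== VERDICT (by name: the statement is the Claim_ definition above) =====
theorem extract_notes_fragments_spec : Claim_equal_extract_notes_fragments := by
  intro notes max_chars _
  unfold Spec_extract_notes_fragments extract_notes_fragments extract_notes_fragments_alt pvCollect
  by_cases h : notes == ""
  · simp [h]
  · simp only [h, if_false, Bool.false_eq_true]
    have := pv_fold_eq (PySem.Str.splitlines notes) [] [] none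
    rw [this]
    rfl
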